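/- HAND-WRITTEN (farm/mkstatement.py generates `Calls` statements only; `_start_vorbis` is not a function).
   THE STATEMENT of the proof unit `_start_vorbis`: the stub (13 instructions) reaches `vorbis_exit` from a start state, given the
   contracts of its two callees. What the names mean: Vorbis/Spec/Basic.lean, Vorbis/Spec/Top.lean §10. The theorem to prove:
   `theorem start_vorbis_ok : Vorbis.Spec.start_vorbis.Statement`. -/
import Vorbis.Spec.Runtime
import Vorbis.Spec.Top
namespace Vorbis.Spec.start_vorbis
open X86 X86.User Asan

/-- The statement of unit `_start_vorbis`. -/
def Statement : Prop :=
  ∀ (Lay : Layout) (_hLay : Lay.hi = 0x1000000) (μ : Microarch) (_hμ : UserX.MicroOK μ) (u₀ : State)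
    (_hcode : HasCodeNat Lay u₀ Vorbis.L._start_vorbis.entry Vorbis.Code.code__start_vorbis.nat Vorbis.L._start_vorbis.size)
    (_h_run_ctors : Calls Lay μ Vorbis.WayInv (Vorbis.conv u₀) Vorbis.L.run_ctors.entry (Asan.runCtorsSpec Vorbis.Spec.rt))
    (_h_decode_all : ∀ (others : List Obj) (frames : List (Nat × FrameLayout)) (len : Nat), Calls Lay μ Vorbis.WayInv (Vorbis.conv u₀) Vorbis.L.decode_all.entry (Vorbis.Spec.decode_all.spec others frames len)),
    Vorbis.Spec.start_vorbis.Reaches Lay μ u₀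

end Vorbis.Spec.start_vorbis
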